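-- pv_equiv track=rewrite | github.com/gptprojectmanager/UTXOracle | scripts/metrics/wasserstein.py | _detect_sustained_shift
-- ===== SOURCE A (Python) =====
-- SUSTAINED_COUNT = 3  # Consecutive windows for sustained shift
--
-- def _detect_sustained_shift(
--     is_significant_list: list[bool], sustained_count: int = SUSTAINED_COUNT
-- ) -> tuple[bool, list[int]]:
--     """
--     Detect if shift is sustained (consecutive high-W windows).
--
--     Args:
--         is_significant_list: List of boolean significance flags
--         sustained_count: Number of consecutive windows required
--
--     Returns:
--         Tuple of (sustained_detected, list of shift window indices)
--     """
--     shift_windows = [i for i, sig in enumerate(is_significant_list) if sig]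
--
--     if len(shift_windows) < sustained_count:
--         return False, shift_windows
--
--     # Check for consecutive windows
--     for i in range(len(shift_windows) - sustained_count + 1):
--         consecutive = True
--         for j in range(1, sustained_count):
--             if shift_windows[i + j] - shift_windows[i + j - 1] != 1:
--                 consecutive = False
--                 break
--         if consecutive:
--             return True, shift_windows
--
--     return False, shift_windows
-- ===== SOURCE B (Python) =====
-- SUSTAINED_COUNT = 3  # Consecutive windows for sustained shift
--
--
-- def _detect_sustained_shift(
--     is_significant_list: list[bool], sustained_count: int = SUSTAINED_COUNT
-- ) -> tuple[bool, list[int]]: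
--     """Single linear pass: collect significant indices while tracking the
--     longest run of consecutive True flags; sustained iff that run reaches
--     sustained_count."""
--     shift_windows = []
--     run = 0
--     max_run = 0
--     for i, sig in enumerate(is_significant_list):
--         if sig:
--             shift_windows.append(i)
--             run += 1
--             if run > max_run:
--                 max_run = run
--         else:
--             run = 0
--     return max_run >= sustained_count, shift_windows
-- ===== Notes on version B (the rewrite author's own statement) =====
-- stated objective: simpler
-- what changed: Replaced the build-then-scan design (index comprehension followed by a nested window scan over the gap list with early returns) by one linear pass that tracks the current and maximum run of consecutive True flags and compares max_run with sustained_count.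
import Mathlib
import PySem

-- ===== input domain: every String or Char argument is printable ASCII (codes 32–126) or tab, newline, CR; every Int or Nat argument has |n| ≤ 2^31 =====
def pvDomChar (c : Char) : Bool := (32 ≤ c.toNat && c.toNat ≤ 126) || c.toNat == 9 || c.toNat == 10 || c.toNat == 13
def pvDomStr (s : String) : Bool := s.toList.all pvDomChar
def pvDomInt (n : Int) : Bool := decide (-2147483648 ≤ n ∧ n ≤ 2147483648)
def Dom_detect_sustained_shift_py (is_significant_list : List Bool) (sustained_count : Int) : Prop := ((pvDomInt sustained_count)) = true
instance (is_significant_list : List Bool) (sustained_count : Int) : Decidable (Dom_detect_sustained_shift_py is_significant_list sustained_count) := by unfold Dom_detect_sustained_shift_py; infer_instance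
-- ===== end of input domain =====

-- B replaces A's comprehension-plus-nested-gap-scan by one linear pass tracking the
-- maximum run of consecutive True flags (objective: simpler; return value identical).

-- ===== PORT A =====
-- inner 'for j in range(1, sustained_count)' loop with its break (consecutive = False → break);
-- indices i+j, i+j-1 are always in range in A, so pyGetD's default is never consulted
def pvAInner (sw : List Int) (i : Int) : List Int → Bool
  | [] => true
  | j :: js =>
    if PySem.List.pyGetD sw (i + j) 0 - PySem.List.pyGetD sw (i + j - 1) 0 ≠ 1 then false
    else pvAInner sw i js

-- outer 'for i in range(...)' loop with its early 'return True'
def pvAOuter (sw : List Int) (sc : Int) : List Int → Bool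
  | [] => false
  | i :: is_ => if pvAInner sw i (PySem.List.pyRange 1 sc 1) then true else pvAOuter sw sc is_

def detect_sustained_shift_py (is_significant_list : List Bool) (sustained_count : Int) : Bool × List Int :=
  let shift_windows := ((PySem.List.enumerate is_significant_list 0).filter (fun p => p.2)).map (fun p => p.1)
  if (shift_windows.length : Int) < sustained_count then (false, shift_windows)
  else if pvAOuter shift_windows sustained_count
            (PySem.List.pyRange 0 ((shift_windows.length : Int) - sustained_count + 1) 1) then
    (true, shift_windows)
  else (false, shift_windows)

-- ===== PORT B =====
-- loop body of B's single pass: append a significant index, update run / max_run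
def pvBStep (st : List Int × Int × Int) (p : Int × Bool) : List Int × Int × Int :=
  if p.2 then
    let run' := st.2.1 + 1
    (st.1 ++ [p.1], run', if run' > st.2.2 then run' else st.2.2)
  else (st.1, 0, st.2.2)

def detect_sustained_shift_py_alt (is_significant_list : List Bool) (sustained_count : Int) : Bool × List Int :=
  let st := (PySem.List.enumerate is_significant_list 0).foldl pvBStep ([], 0, 0)
  (decide (st.2.2 ≥ sustained_count), st.1)

-- ===== PRECONDITION & SPEC =====
def Spec_detect_sustained_shift_py (is_significant_list : List Bool) (sustained_count : Int) (out : Bool × List Int) : Prop := out = detect_sustained_shift_py_alt is_significant_list sustained_count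
instance (is_significant_list : List Bool) (sustained_count : Int) (out : Bool × List Int) : Decidable (Spec_detect_sustained_shift_py is_significant_list sustained_count out) := by unfold Spec_detect_sustained_shift_py; infer_instance

-- ===== CLAIM (what is proved, stated in full; the proofs are below) =====
def Claim_equal_detect_sustained_shift_py : Prop := ∀ (is_significant_list : List Bool) (sustained_count : Int), Dom_detect_sustained_shift_py is_significant_list sustained_count → Spec_detect_sustained_shift_py is_significant_list sustained_count (detect_sustained_shift_py is_significant_list sustained_count)

-- ===== LEMMAS AND PROOFS =====

-- the list of significant indices, with the running offset made explicit
def swFrom (k : Int) : List Bool → List Int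
  | [] => []
  | true :: t => k :: swFrom (k + 1) t
  | false :: t => swFrom (k + 1) t

-- length of the leading run of True flags
def leadRun : List Bool → Nat
  | true :: t => leadRun t + 1
  | _ => 0

-- reference predicate: 'there is a run of ≥ sc consecutive True flags'
def hasRunB (sc : Int) : List Bool → Bool
  | [] => decide (sc ≤ 0)
  | true :: t => decide (sc - 1 ≤ (leadRun t : Int)) || hasRunB sc t
  | false :: t => hasRunB sc t

-- final run counter / final maximum of B's fold, as structural recursions
def finalRun (r : Int) : List Bool → Int
  | [] => r
  | true :: t => finalRun (r + 1) t
  | false :: t => finalRun 0 t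

def finalMax (r m : Int) : List Bool → Int
  | [] => m
  | true :: t => finalMax (r + 1) (if r + 1 > m then r + 1 else m) t
  | false :: t => finalMax 0 m t

def bestFrom (r : Int) : List Bool → Int
  | [] => 0
  | true :: t => max (r + 1) (bestFrom (r + 1) t)
  | false :: t => bestFrom 0 t

theorem sw_eq (lst : List Bool) : ∀ (k : Int),
    ((PySem.List.enumerate lst k).filter (fun p => p.2)).map (fun p => p.1) = swFrom k lst := by
  induction lst with
  | nil => intro k; simp [PySem.List.enumerate_nil, swFrom]
  | cons b t ih =>
    intro k
    cases b <;> simp [PySem.List.enumerate_cons, swFrom, ih (k + 1)]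

theorem leadRun_le (lst : List Bool) : ∀ k, leadRun lst ≤ (swFrom k lst).length := by
  induction lst with
  | nil => intro k; simp [leadRun, swFrom]
  | cons b t ih =>
    intro k
    cases b
    · simp [leadRun, swFrom]
    · simp [leadRun, swFrom]; exact ih (k + 1)

-- element j of swFrom k lst equals k + j while j is inside the leading run
theorem sw_get_lead (lst : List Bool) : ∀ (k : Int) (j : Nat), j < leadRun lst →
    (swFrom k lst)[j]? = some (k + j) := by
  induction lst with
  | nil => intro k j h; simp [leadRun] at h
  | cons b t ih =>
    intro k j h
    cases b
    · simp [leadRun] at h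
    · simp only [leadRun] at h
      cases j with
      | zero => simp [swFrom]
      | succ j' =>
        have := ih (k + 1) j' (by omega)
        simp only [swFrom, List.getElem?_cons_succ, this]
        congr 1
        push_cast
        ring

-- every element of swFrom k lst is ≥ k + its index
theorem sw_get_ge (lst : List Bool) : ∀ (k : Int) (j : Nat) (h : j < (swFrom k lst).length),
    k + j ≤ (swFrom k lst)[j] := by
  induction lst with
  | nil => intro k j h; simp [swFrom] at h
  | cons b t ih =>
    intro k j h
    cases b
    · simp only [swFrom] at h ⊢
      have := ih (k + 1) j (by simpa using h)
      omega
    · simp only [swFrom] at h ⊢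
      cases j with
      | zero => simp
      | succ j' =>
        have := ih (k + 1) j' (by simp at h; omega)
        simp only [List.getElem_cons_succ]
        push_cast at this ⊢
        omega

-- just past the leading run the element (if any) is ≥ k + leadRun + 1
theorem sw_get_past (lst : List Bool) : ∀ (k : Int) (h : leadRun lst < (swFrom k lst).length),
    k + (leadRun lst : Int) + 1 ≤ (swFrom k lst)[leadRun lst] := by
  induction lst with
  | nil => intro k h; simp [swFrom] at h
  | cons b t ih =>
    intro k h
    cases b
    · simp only [swFrom, leadRun] at h ⊢
      have := sw_get_ge t (k + 1) 0 h
      simpa using this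
    · simp only [swFrom, leadRun] at h ⊢
      have := ih (k + 1) (by simpa using h)
      simp only [List.getElem_cons_succ]
      push_cast at this ⊢
      omega

theorem pyGetD_cons_pos (x : Int) (xs : List Int) (m : Int) (hm : 1 ≤ m) (d : Int) :
    PySem.List.pyGetD (x :: xs) m d = PySem.List.pyGetD xs (m - 1) d := by
  have h1 : m = (((m - 1).toNat + 1 : Nat) : Int) := by omega
  rw [h1, PySem.List.pyGetD_natCast]
  have h2 : (((m - 1).toNat + 1 : Nat) : Int) - 1 = (((m - 1).toNat : Nat) : Int) := by push_cast; ring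
  rw [h2, PySem.List.pyGetD_natCast]
  rfl

theorem all_congr_mem (l : List Int) (f g : Int → Bool) (h : ∀ x ∈ l, f x = g x) :
    l.all f = l.all g := by
  induction l with
  | nil => rfl
  | cons x xs ih =>
    simp only [List.all_cons, h x (List.mem_cons_self), ih (fun y hy => h y (List.mem_cons_of_mem x hy))]

-- swFrom just past the leading run, in getElem? form (no proof dependency)
theorem sw_get_past_some (lst : List Bool) (k : Int) (h : leadRun lst < (swFrom k lst).length) :
    ∃ v, (swFrom k lst)[leadRun lst]? = some v ∧ k + (leadRun lst : Int) + 1 ≤ v :=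
  ⟨_, List.getElem?_eq_getElem h, sw_get_past lst k h⟩

theorem inner_eq_all (sw : List Int) (i : Int) (js : List Int) :
    pvAInner sw i js = js.all (fun j => decide (PySem.List.pyGetD sw (i + j) 0 - PySem.List.pyGetD sw (i + j - 1) 0 = 1)) := by
  induction js with
  | nil => rfl
  | cons j js ih =>
    simp only [pvAInner, List.all_cons, ih]
    by_cases h : PySem.List.pyGetD sw (i + j) 0 - PySem.List.pyGetD sw (i + j - 1) 0 = 1 <;> simp [h]

theorem outer_eq_any (sw : List Int) (sc : Int) (is_ : List Int) :
    pvAOuter sw sc is_ = is_.any (fun i => pvAInner sw i (PySem.List.pyRange 1 sc 1)) := by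
  induction is_ with
  | nil => rfl
  | cons i is_ ih =>
    simp only [pvAOuter, List.any_cons, ih]
    by_cases h : pvAInner sw i (PySem.List.pyRange 1 sc 1) <;> simp [h]

-- the inner check at window start 0 on swFrom k (true :: t) is exactly 'sc - 1 ≤ leadRun t'
theorem inner_zero (t : List Bool) (k sc : Int) (hk : 0 ≤ k) (hsc : 1 ≤ sc) :
    pvAInner (k :: swFrom (k + 1) t) 0 (PySem.List.pyRange 1 sc 1)
      = decide (sc - 1 ≤ (leadRun t : Int)) := by
  have hL : (k :: swFrom (k + 1) t) = swFrom k (true :: t) := rfl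
  have hlr : leadRun (true :: t) = leadRun t + 1 := rfl
  have hget : ∀ (j : Nat), j < leadRun t + 1 →
      PySem.List.pyGetD (swFrom k (true :: t)) ((j : Nat) : Int) 0 = k + j := by
    intro j hj
    have h1 := sw_get_lead (true :: t) k j (by omega)
    rw [PySem.List.pyGetD_natCast, List.getD_eq_getElem?_getD, h1]
    rfl
  rw [hL, inner_eq_all]
  by_cases hcase : sc - 1 ≤ (leadRun t : Int)
  · simp only [hcase, decide_true]
    rw [List.all_eq_true]
    intro j hj
    obtain ⟨hj1, hj2⟩ := PySem.List.mem_pyRange_one.mp hj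
    have e1 : PySem.List.pyGetD (swFrom k (true :: t)) (0 + j) 0 = k + j := by
      have h := hget j.toNat (by omega)
      rw [show (0 : Int) + j = ((j.toNat : Nat) : Int) by omega, h]
      omega
    have e2 : PySem.List.pyGetD (swFrom k (true :: t)) (0 + j - 1) 0 = k + (j - 1) := by
      have h := hget (j - 1).toNat (by omega)
      rw [show (0 : Int) + j - 1 = (((j - 1).toNat : Nat) : Int) by omega, h]
      omega
    rw [e1, e2, decide_eq_true_eq]
    ring
  · simp only [hcase, decide_false]
    apply List.all_eq_false.mpr
    refine ⟨(leadRun t : Int) + 1, PySem.List.mem_pyRange_one.mpr ⟨by omega, by omega⟩, ?_⟩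
    have eprev : PySem.List.pyGetD (swFrom k (true :: t)) (0 + ((leadRun t : Int) + 1) - 1) 0
        = k + leadRun t := by
      have h := hget (leadRun t) (by omega)
      rw [show (0 : Int) + ((leadRun t : Int) + 1) - 1 = ((leadRun t : Nat) : Int) by omega, h]
    have hidx : (0 : Int) + ((leadRun t : Int) + 1) = (((leadRun t + 1 : Nat) : Nat) : Int) := by
      push_cast; ring
    by_cases hlen : leadRun t + 1 < (swFrom k (true :: t)).length
    · obtain ⟨v, hv, hvge⟩ := sw_get_past_some (true :: t) k (by rw [hlr]; omega)
      rw [hlr] at hv hvge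
      have ecur : PySem.List.pyGetD (swFrom k (true :: t)) (0 + ((leadRun t : Int) + 1)) 0 = v := by
        rw [hidx, PySem.List.pyGetD_natCast, List.getD_eq_getElem?_getD, hv]
        rfl
      rw [ecur, eprev, decide_eq_true_eq]
      push_cast at hvge ⊢
      omega
    · have ecur : PySem.List.pyGetD (swFrom k (true :: t)) (0 + ((leadRun t : Int) + 1)) 0 = 0 := by
        rw [hidx, PySem.List.pyGetD_natCast, List.getD_eq_getElem?_getD,
            List.getElem?_eq_none (by omega)]
        rfl
      rw [ecur, eprev, decide_eq_true_eq]
      omega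

-- shifting the window start right by one on a cons'ed sw removes the head
theorem inner_shift (sw : List Int) (k i : Int) (hi : 0 ≤ i) (js : List Int) (hjs : ∀ j ∈ js, 1 ≤ j) :
    pvAInner (k :: sw) (i + 1) js = pvAInner sw i js := by
  rw [inner_eq_all, inner_eq_all]
  refine all_congr_mem _ _ _ (fun j hj => ?_)
  have hj1 := hjs j hj
  have e1 : PySem.List.pyGetD (k :: sw) (i + 1 + j) 0 = PySem.List.pyGetD sw (i + j) 0 := by
    rw [pyGetD_cons_pos k sw (i + 1 + j) (by omega) 0]
    congr 1
    ring
  have e2 : PySem.List.pyGetD (k :: sw) (i + 1 + j - 1) 0 = PySem.List.pyGetD sw (i + j - 1) 0 := by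
    rw [pyGetD_cons_pos k sw (i + 1 + j - 1) (by omega) 0]
    congr 1
    ring
  rw [e1, e2]

theorem outer_shift (sw : List Int) (k sc : Int) (is_ : List Int) (his : ∀ i ∈ is_, 0 ≤ i) :
    pvAOuter (k :: sw) sc (is_.map (· + 1)) = pvAOuter sw sc is_ := by
  rw [outer_eq_any, outer_eq_any, List.any_map]
  refine PySem.List.any_congr_mem (fun i hi => ?_)
  exact inner_shift sw k i (his i hi) _ (fun j hj => (PySem.List.mem_pyRange_one.mp hj).1)

theorem pyRange_succ_shift (m : Int) :
    PySem.List.pyRange 1 m 1 = (PySem.List.pyRange 0 (m - 1) 1).map (· + 1) := by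
  rw [PySem.List.pyRange_one, PySem.List.pyRange_one, List.map_map]
  rw [show m - 1 - 0 = m - 1 by ring]
  exact List.map_congr_left (fun x _ => by simp; ring)

-- A's boolean, as a function of sw
def fullA (sw : List Int) (sc : Int) : Bool :=
  if (sw.length : Int) < sc then false
  else pvAOuter sw sc (PySem.List.pyRange 0 ((sw.length : Int) - sc + 1) 1)

theorem fullA_eq_hasRunB (sc : Int) (lst : List Bool) : ∀ (k : Int), 0 ≤ k →
    fullA (swFrom k lst) sc = hasRunB sc lst := by
  induction lst with
  | nil =>
    intro k hk
    by_cases h : (0 : Int) < sc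
    · unfold fullA
      simp only [swFrom, List.length_nil]
      rw [if_pos (by exact_mod_cast h)]
      simp only [hasRunB]
      symm; rw [decide_eq_false_iff_not]; omega
    · unfold fullA
      simp only [swFrom, List.length_nil]
      rw [if_neg (by push_cast; omega)]
      rw [PySem.List.pyRange_one_cons (by push_cast; omega)]
      have hone : pvAInner ([] : List Int) 0 (PySem.List.pyRange 1 sc 1) = true := by
        rw [PySem.List.pyRange_one_eq_nil (by omega)]
        rfl
      unfold pvAOuter
      rw [hone]
      simp only [eq_self_iff_true, if_true, hasRunB]
      symm; rw [decide_eq_true_eq]; omega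
  | cons b t ih =>
    intro k hk
    cases b
    · simp only [swFrom, hasRunB]
      exact ih (k + 1) (by omega)
    · have hR := leadRun_le t (k + 1)
      simp only [swFrom, hasRunB]
      by_cases hsc0 : sc ≤ 0
      · unfold fullA
        rw [if_neg (by simp; omega)]
        rw [PySem.List.pyRange_one_cons (by simp; omega)]
        have hone : pvAInner (k :: swFrom (k + 1) t) 0 (PySem.List.pyRange 1 sc 1) = true := by
          rw [PySem.List.pyRange_one_eq_nil (by omega)]
          rfl
        unfold pvAOuter
        rw [hone]
        have hdec : decide (sc - 1 ≤ (leadRun t : Int)) = true := by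
          rw [decide_eq_true_eq]; omega
        simp only [eq_self_iff_true, if_true, hdec, Bool.true_or]
      · have hsc1 : 1 ≤ sc := by omega
        by_cases hbig : (((swFrom (k + 1) t).length : Int) + 1) < sc
        · unfold fullA
          rw [if_pos (by simp; omega)]
          have h1 : hasRunB sc t = fullA (swFrom (k + 1) t) sc := (ih (k + 1) (by omega)).symm
          have h2 : fullA (swFrom (k + 1) t) sc = false := by
            unfold fullA; rw [if_pos (by omega)]
          rw [h1, h2]
          symm
          simp only [Bool.or_false, decide_eq_false_iff_not]
          omega
        · unfold fullA
          rw [if_neg (by simp; omega)]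
          have hm : (0 : Int) < ((k :: swFrom (k + 1) t).length : Int) - sc + 1 := by
            simp; omega
          rw [PySem.List.pyRange_one_cons hm]
          unfold pvAOuter
          simp only [zero_add]
          rw [inner_zero t k sc hk hsc1]
          rw [pyRange_succ_shift]
          rw [outer_shift (swFrom (k + 1) t) k sc _
              (fun i hi => (PySem.List.mem_pyRange_one.mp hi).1)]
          have IH := ih (k + 1) (by omega)
          rw [← IH]
          have hout : pvAOuter (swFrom (k + 1) t) sc
              (PySem.List.pyRange 0 (((k :: swFrom (k + 1) t).length : Int) - sc + 1 - 1) 1)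
              = fullA (swFrom (k + 1) t) sc := by
            unfold fullA
            by_cases hn : ((swFrom (k + 1) t).length : Int) < sc
            · rw [if_pos hn]
              rw [show ((k :: swFrom (k + 1) t).length : Int) - sc + 1 - 1
                  = ((swFrom (k + 1) t).length : Int) - sc + 1 by simp; ring]
              rw [PySem.List.pyRange_one_eq_nil (by omega)]
              rfl
            · rw [if_neg hn]
              rw [show ((k :: swFrom (k + 1) t).length : Int) - sc + 1 - 1
                  = ((swFrom (k + 1) t).length : Int) - sc + 1 by simp; ring]
          rw [hout]
          by_cases hd : sc - 1 ≤ (leadRun t : Int) <;> simp [hd]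

-- ===== B side =====

theorem foldB (lst : List Bool) : ∀ (k : Int) (sw0 : List Int) (r m : Int),
    (PySem.List.enumerate lst k).foldl pvBStep (sw0, r, m)
      = (sw0 ++ swFrom k lst, finalRun r lst, finalMax r m lst) := by
  induction lst with
  | nil => intro k sw0 r m; simp [PySem.List.enumerate_nil, swFrom, finalRun, finalMax]
  | cons b t ih =>
    intro k sw0 r m
    cases b
    · have hstep : pvBStep (sw0, r, m) (k, false) = (sw0, 0, m) := rfl
      rw [PySem.List.enumerate_cons, List.foldl_cons, hstep, ih (k + 1) sw0 0 m]
      simp [swFrom, finalRun, finalMax]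
    · have hstep : pvBStep (sw0, r, m) (k, true)
          = (sw0 ++ [k], r + 1, if r + 1 > m then r + 1 else m) := rfl
      rw [PySem.List.enumerate_cons, List.foldl_cons, hstep,
          ih (k + 1) (sw0 ++ [k]) (r + 1) _]
      simp [swFrom, finalRun, finalMax]

theorem finalMax_eq (lst : List Bool) : ∀ (r m : Int), 0 ≤ m →
    finalMax r m lst = max m (bestFrom r lst) := by
  induction lst with
  | nil => intro r m hm; simp only [finalMax, bestFrom]; omega
  | cons b t ih =>
    intro r m hm
    cases b
    · simp only [finalMax, bestFrom]; exact ih 0 m hm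
    · simp only [finalMax, bestFrom]
      rw [ih (r + 1) _ (by omega)]
      omega

theorem hasRunB_of_nonpos (lst : List Bool) (sc : Int) (h : sc ≤ 0) : hasRunB sc lst = true := by
  induction lst with
  | nil => simp only [hasRunB]; rw [decide_eq_true_eq]; omega
  | cons b t ih =>
    cases b
    · simpa only [hasRunB] using ih
    · simp only [hasRunB, Bool.or_eq_true]; left; rw [decide_eq_true_eq]; omega

theorem hasRunB_of_lead (lst : List Bool) (sc : Int) (h : lst.headD false = true)
    (h2 : sc ≤ 1 + (leadRun lst.tail : Int)) : hasRunB sc lst = true := by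
  cases lst with
  | nil => simp at h
  | cons b t =>
    cases b
    · simp at h
    · simp only [List.tail_cons] at h2
      simp only [hasRunB, Bool.or_eq_true]; left; rw [decide_eq_true_eq]; omega

-- sc ≤ bestFrom r lst ↔ the first run extended by r reaches sc, or lst has a run of ≥ sc
theorem bestFrom_iff (sc : Int) (lst : List Bool) : ∀ (r : Int), 0 ≤ r →
    (sc ≤ bestFrom r lst
      ↔ ((lst.headD false = true ∧ sc ≤ r + 1 + (leadRun lst.tail : Int)) ∨ hasRunB sc lst = true)) := by
  induction lst with
  | nil =>
    intro r hr
    simp only [bestFrom, List.headD_nil, List.tail_nil, hasRunB, decide_eq_true_eq]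
    constructor
    · intro h; right; omega
    · rintro (⟨h, _⟩ | h); · simp at h
      · omega
  | cons b t ih =>
    intro r hr
    cases b
    · simp only [bestFrom, List.headD_cons, List.tail_cons, hasRunB]
      rw [ih 0 le_rfl]
      constructor
      · rintro (⟨h1, h2⟩ | h)
        · exact Or.inr (hasRunB_of_lead t sc h1 (by omega))
        · exact Or.inr h
      · rintro (⟨h1, _⟩ | h)
        · simp at h1
        · exact Or.inr h
    · simp only [bestFrom, List.headD_cons, List.tail_cons, hasRunB]
      rw [le_max_iff, ih (r + 1) (by omega)]
      cases t with
      | nil =>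
        simp only [List.headD_nil, List.tail_nil, leadRun, hasRunB, Bool.or_eq_true,
          decide_eq_true_eq, Bool.false_eq_true, false_and, false_or, true_and]
        push_cast
        omega
      | cons b' t' =>
        cases b'
        · simp only [List.headD_cons, List.tail_cons, hasRunB, Bool.or_eq_true,
            decide_eq_true_eq, leadRun, Bool.false_eq_true, false_and, false_or, true_and]
          cases hP : hasRunB sc t' <;>
            simp only [hP, Bool.false_eq_true, eq_self_iff_true, or_false, false_or, or_true,
              true_or, true_and, and_true] <;>
            (try push_cast) <;> (try omega)
        · simp only [List.headD_cons, List.tail_cons, hasRunB, Bool.or_eq_true,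
            decide_eq_true_eq, leadRun, Bool.false_eq_true, false_and, false_or, true_and]
          cases hP : hasRunB sc t' <;>
            simp only [hP, Bool.false_eq_true, eq_self_iff_true, or_false, false_or, or_true,
              true_or, true_and, and_true] <;>
            (try push_cast) <;> (try omega)

-- ===== VERDICT (by name: the statement is the Claim_ definition above) =====
theorem detect_sustained_shift_py_spec : Claim_equal_detect_sustained_shift_py := by
  intro lst sc _
  unfold Spec_detect_sustained_shift_py
  have hA : detect_sustained_shift_py lst sc = (fullA (swFrom 0 lst) sc, swFrom 0 lst) := by
    unfold detect_sustained_shift_py fullA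
    rw [sw_eq lst 0]
    by_cases h1 : ((swFrom 0 lst).length : Int) < sc
    · simp [h1]
    · simp only [h1, if_false]
      by_cases h2 : pvAOuter (swFrom 0 lst) sc
          (PySem.List.pyRange 0 (((swFrom 0 lst).length : Int) - sc + 1) 1) <;> simp [h2]
  have hB : detect_sustained_shift_py_alt lst sc
      = (decide (finalMax 0 0 lst ≥ sc), swFrom 0 lst) := by
    unfold detect_sustained_shift_py_alt
    rw [foldB lst 0 [] 0 0]
    simp
  rw [hA, hB]
  have hmax : finalMax 0 0 lst = max 0 (bestFrom 0 lst) := finalMax_eq lst 0 0 le_rfl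
  have hiff := bestFrom_iff sc lst 0 le_rfl
  refine Prod.ext ?_ rfl
  show fullA (swFrom 0 lst) sc = decide (finalMax 0 0 lst ≥ sc)
  rw [fullA_eq_hasRunB sc lst 0 le_rfl]
  cases hrb : hasRunB sc lst with
  | false =>
    symm; rw [decide_eq_false_iff_not]
    intro hge
    rw [ge_iff_le, hmax] at hge
    rcases le_max_iff.mp hge with h0 | hb
    · exact absurd (hasRunB_of_nonpos lst sc h0) (by simp [hrb])
    · rcases hiff.mp hb with ⟨hh, h2⟩ | hr
      · exact absurd (hasRunB_of_lead lst sc hh (by omega)) (by simp [hrb])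
      · exact absurd hr (by simp [hrb])
  | true =>
    symm; rw [decide_eq_true_eq, ge_iff_le, hmax]
    exact le_max_iff.mpr (Or.inr (hiff.mpr (Or.inr hrb)))
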